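-- pv_equiv track=rewrite | github.com/mrgagauz-beep/space-aces-game | src/vision/minimap.py | _is_near_corner
-- ===== SOURCE A (Python) =====
-- def _is_near_corner(x: int, y: int, w: int, h: int, radius: int = 20) -> bool:
--     """
--     Return True if point (x, y) lies within `radius` pixels of any corner
--     of a rectangle with size (w, h), in minimap ROI coordinates.
--     """
--     corners = (
--         (0, 0),
--         (w - 1, 0),
--         (0, h - 1),
--         (w - 1, h - 1),
--     )
--     r2 = radius * radius
--     for cx, cy in corners:
--         dx = x - cx
--         dy = y - cy
--         if dx * dx + dy * dy <= r2:
--             return True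
--     return False
-- ===== SOURCE B (Python) =====
-- def _is_near_corner(x: int, y: int, w: int, h: int, radius: int = 20) -> bool:
--     # Closed form: corners are the product {0, w-1} x {0, h-1}, so the squared
--     # distance to the nearest corner separates per axis.
--     mdx = min(abs(x), abs(x - (w - 1)))
--     mdy = min(abs(y), abs(y - (h - 1)))
--     return mdx * mdx + mdy * mdy <= radius * radius
-- ===== Notes on version B (the rewrite author's own statement) =====
-- stated objective: simpler
-- what changed: Replaces the loop over the four explicit corner tuples by a loop-free separable closed form: per-axis nearest-corner distances min(|x|,|x-(w-1)|) and min(|y|,|y-(h-1)|), compared squared against radius^2.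
import Mathlib
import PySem

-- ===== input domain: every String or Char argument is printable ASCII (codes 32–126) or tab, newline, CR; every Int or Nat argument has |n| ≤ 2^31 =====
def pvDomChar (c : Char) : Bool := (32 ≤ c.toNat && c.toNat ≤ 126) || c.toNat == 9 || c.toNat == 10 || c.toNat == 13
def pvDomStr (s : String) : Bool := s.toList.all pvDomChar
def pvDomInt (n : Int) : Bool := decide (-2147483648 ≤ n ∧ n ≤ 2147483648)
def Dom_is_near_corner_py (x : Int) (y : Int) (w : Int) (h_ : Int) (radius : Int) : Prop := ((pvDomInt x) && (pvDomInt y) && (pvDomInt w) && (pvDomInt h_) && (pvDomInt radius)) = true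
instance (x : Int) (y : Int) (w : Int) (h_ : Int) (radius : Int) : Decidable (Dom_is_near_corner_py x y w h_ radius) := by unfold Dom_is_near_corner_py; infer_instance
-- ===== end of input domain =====

-- B replaces A's loop over the four corner tuples by a loop-free separable closed form (per-axis nearest-corner distances); same return value everywhere.


-- ===== PORT A =====
-- A's for-loop over the corner tuple, transliterated as structural recursion with early return
def pvCornerLoop (x : Int) (y : Int) (r2 : Int) : List (Int × Int) → Bool
  | [] => false
  | (cx, cy) :: rest =>
      let dx := x - cx
      let dy := y - cy
      if dx * dx + dy * dy ≤ r2 then true else pvCornerLoop x y r2 rest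

def is_near_corner_py (x : Int) (y : Int) (w : Int) (h_ : Int) (radius : Int) : Bool :=
  let corners : List (Int × Int) := [(0, 0), (w - 1, 0), (0, h_ - 1), (w - 1, h_ - 1)]
  let r2 := radius * radius
  pvCornerLoop x y r2 corners

-- ===== PORT B =====
def is_near_corner_py_alt (x : Int) (y : Int) (w : Int) (h_ : Int) (radius : Int) : Bool :=
  let mdx := min |x| |x - (w - 1)|
  let mdy := min |y| |y - (h_ - 1)|
  decide (mdx * mdx + mdy * mdy ≤ radius * radius)

-- ===== PRECONDITION & SPEC =====
def Spec_is_near_corner_py (x : Int) (y : Int) (w : Int) (h_ : Int) (radius : Int) (out : Bool) : Prop := out = is_near_corner_py_alt x y w h_ radius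
instance (x : Int) (y : Int) (w : Int) (h_ : Int) (radius : Int) (out : Bool) : Decidable (Spec_is_near_corner_py x y w h_ radius out) := by unfold Spec_is_near_corner_py; infer_instance

-- ===== CLAIM (what is proved, stated in full; the proofs are below) =====
def Claim_equal_is_near_corner_py : Prop := ∀ (x : Int) (y : Int) (w : Int) (h_ : Int) (radius : Int), Dom_is_near_corner_py x y w h_ radius → Spec_is_near_corner_py x y w h_ radius (is_near_corner_py x y w h_ radius)

-- ===== LEMMAS AND PROOFS =====

-- the square of the smaller absolute value is the smaller square
theorem pv_min_abs_sq (a b : Int) : (min |a| |b|) * (min |a| |b|) = min (a * a) (b * b) := by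
  rcases le_total |a| |b| with h | h
  · rw [min_eq_left h, abs_mul_abs_self, min_eq_left]
    calc a * a = |a| * |a| := (abs_mul_abs_self a).symm
      _ ≤ |b| * |b| := mul_le_mul h h (abs_nonneg a) (abs_nonneg b)
      _ = b * b := abs_mul_abs_self b
  · rw [min_eq_right h, abs_mul_abs_self, min_eq_right]
    calc b * b = |b| * |b| := (abs_mul_abs_self b).symm
      _ ≤ |a| * |a| := mul_le_mul h h (abs_nonneg b) (abs_nonneg a)
      _ = a * a := abs_mul_abs_self a

-- ===== VERDICT (by name: the statement is the Claim_ definition above) =====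
theorem is_near_corner_py_spec : Claim_equal_is_near_corner_py := by
  intro x y w h_ radius _
  unfold Spec_is_near_corner_py
  simp only [is_near_corner_py, is_near_corner_py_alt, pvCornerLoop]
  rw [pv_min_abs_sq, pv_min_abs_sq]
  simp only [sub_zero]
  generalize x * x = A2
  generalize (x - (w - 1)) * (x - (w - 1)) = B2
  generalize y * y = C2
  generalize (y - (h_ - 1)) * (y - (h_ - 1)) = D2
  generalize radius * radius = R2
  split_ifs <;> simp <;> omega
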